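-- pv_equiv track=rewrite | github.com/tanuki-create/datascience | leetcode/easy/015_remove_duplicates_from_sorted_array/solution.py | find_duplicates_in_sorted_array
-- ===== SOURCE A (Python) =====
-- def find_duplicates_in_sorted_array(nums):
--     """
--     Find all duplicate elements in a sorted array.
--
--     Args:
--         nums: Sorted array
--
--     Returns:
--         list: List of duplicate elements
--     """
--     if not nums:
--         return []
--
--     duplicates = []
--     i = 0
--
--     while i < len(nums):
--         # Count consecutive occurrences
--         count = 1
--         j = i + 1
--         while j < len(nums) and nums[j] == nums[i]:
--             count += 1
--             j += 1
--
--         # If count > 1, it's a duplicate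
--         if count > 1:
--             duplicates.append(nums[i])
--
--         i = j
--
--     return duplicates
-- ===== SOURCE B (Python) =====
-- def find_duplicates_in_sorted_array(nums):
--     """Single pass over adjacent pairs: an element is reported when it equals
--     its successor and differs from its predecessor (i.e. it starts a run of
--     length >= 2)."""
--     out = []
--     prev = None
--     for a, b in zip(nums, nums[1:]):
--         if a == b and a != prev:
--             out.append(a)
--         prev = a
--     return out
-- ===== Notes on version B (the rewrite author's own statement) =====
-- stated objective: simpler
-- what changed: Replaces the nested while-loops that count each run's length with a single pass over adjacent pairs, appending an element exactly when it equals its successor and differs from its predecessor.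
import Mathlib
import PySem

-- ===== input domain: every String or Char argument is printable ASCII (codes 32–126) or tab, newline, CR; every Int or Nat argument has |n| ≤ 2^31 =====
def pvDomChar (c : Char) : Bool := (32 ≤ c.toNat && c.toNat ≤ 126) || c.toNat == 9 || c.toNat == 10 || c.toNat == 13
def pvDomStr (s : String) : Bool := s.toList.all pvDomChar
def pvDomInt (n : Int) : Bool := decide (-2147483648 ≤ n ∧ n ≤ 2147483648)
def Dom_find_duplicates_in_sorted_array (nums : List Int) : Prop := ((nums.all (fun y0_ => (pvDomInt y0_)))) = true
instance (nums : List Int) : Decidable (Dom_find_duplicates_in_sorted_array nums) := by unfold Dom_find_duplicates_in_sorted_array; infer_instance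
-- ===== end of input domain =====

-- B replaces A's nested run-counting while-loops by a single pass over adjacent pairs (same O(n) cost).

-- ===== PORT A =====
-- Inner while loop: `while j < len(nums) and nums[j] == nums[i]: count += 1; j += 1`;
-- returns the final (count, j).  The fuel argument is only a totality guard: the loop body
-- runs at most nums.length - j times, so fuel = nums.length never runs out.
-- All indices A reads are in range, so getD is exact.
def pvRunA (nums : List Int) (v : Int) : Nat → Nat → Nat → Nat × Nat
  | 0, count, j => (count, j)
  | fuel + 1, count, j =>
      if j < nums.length ∧ nums.getD j 0 = v then pvRunA nums v fuel (count + 1) (j + 1)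
      else (count, j)

-- Outer while loop over i, threading the accumulator `duplicates`; fuel is again only a
-- totality guard (i strictly increases each iteration, so fuel = nums.length suffices).
def pvLoopA (nums : List Int) : Nat → Nat → List Int → List Int
  | 0, _, acc => acc
  | fuel + 1, i, acc =>
      if i < nums.length then
        let r := pvRunA nums (nums.getD i 0) nums.length 1 (i + 1)
        pvLoopA nums fuel r.2 (if r.1 > 1 then acc ++ [nums.getD i 0] else acc)
      else acc

def find_duplicates_in_sorted_array (nums : List Int) : List Int :=
  if nums = [] then [] else pvLoopA nums nums.length 0 []

-- ===== PORT B =====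
-- `for a, b in zip(nums, nums[1:])` with state (out, prev); prev starts as None.
def find_duplicates_in_sorted_array_alt (nums : List Int) : List Int :=
  ((nums.zip (nums.drop 1)).foldl
    (fun (st : List Int × Option Int) (ab : Int × Int) =>
      (if ab.1 = ab.2 ∧ st.2 ≠ some ab.1 then st.1 ++ [ab.1] else st.1, some ab.1))
    (([] : List Int), (none : Option Int))).1

-- ===== PRECONDITION & SPEC =====
def Spec_find_duplicates_in_sorted_array (nums : List Int) (out : List Int) : Prop := out = find_duplicates_in_sorted_array_alt nums
instance (nums : List Int) (out : List Int) : Decidable (Spec_find_duplicates_in_sorted_array nums out) := by unfold Spec_find_duplicates_in_sorted_array; infer_instance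

-- ===== CLAIM (what is proved, stated in full; the proofs are below) =====
def Claim_equal_find_duplicates_in_sorted_array : Prop := ∀ (nums : List Int), Dom_find_duplicates_in_sorted_array nums → Spec_find_duplicates_in_sorted_array nums (find_duplicates_in_sorted_array nums)

-- ===== LEMMAS AND PROOFS =====

-- intermediate recursive description of B's pass, used only in the proofs
def pvGo : List Int → Option Int → List Int
  | [], _ => []
  | [_], _ => []
  | a :: b :: t, prev =>
      (if a = b ∧ prev ≠ some a then [a] else []) ++ pvGo (b :: t) (some a)

theorem pvFold_go (l : List Int) (acc : List Int) (prev : Option Int) :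
    ((l.zip (l.drop 1)).foldl
      (fun (st : List Int × Option Int) (ab : Int × Int) =>
        (if ab.1 = ab.2 ∧ st.2 ≠ some ab.1 then st.1 ++ [ab.1] else st.1, some ab.1))
      (acc, prev)).1 = acc ++ pvGo l prev := by
  induction l generalizing acc prev with
  | nil => simp [pvGo]
  | cons a t ih =>
    cases t with
    | nil => simp [pvGo]
    | cons b t' =>
      have ih' := ih (if a = b ∧ prev ≠ some a then acc ++ [a] else acc) (some a)
      simp only [List.drop_succ_cons, List.drop_zero] at ih' ⊢
      simp only [List.zip_cons_cons, List.foldl_cons]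
      rw [ih']
      simp only [pvGo]
      split_ifs <;> simp

theorem pvRunA_snd_ge (nums : List Int) (v : Int) (fuel count j : Nat) :
    j ≤ (pvRunA nums v fuel count j).2 := by
  induction fuel generalizing count j with
  | zero => simp [pvRunA]
  | succ m ih =>
    rw [pvRunA]
    split
    · exact le_trans (by omega) (ih (count + 1) (j + 1))
    · simp

theorem pvRunA_snd_le (nums : List Int) (v : Int) (fuel count j : Nat) :
    j ≤ nums.length → (pvRunA nums v fuel count j).2 ≤ nums.length := by
  induction fuel generalizing count j with
  | zero => intro h; simpa [pvRunA]
  | succ m ih =>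
    intro h
    rw [pvRunA]
    split
    · next hc => exact ih (count + 1) (j + 1) (by omega)
    · simpa

theorem pvRunA_mem (nums : List Int) (v : Int) (fuel count j : Nat) :
    ∀ k, j ≤ k → k < (pvRunA nums v fuel count j).2 → nums.getD k 0 = v := by
  induction fuel generalizing count j with
  | zero => intro k h1 h2; simp [pvRunA] at h2; omega
  | succ m ih =>
    intro k hk1 hk2
    rw [pvRunA] at hk2
    by_cases hc : j < nums.length ∧ nums.getD j 0 = v
    · rw [if_pos hc] at hk2
      rcases Nat.eq_or_lt_of_le hk1 with rfl | h
      · exact hc.2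
      · exact ih (count + 1) (j + 1) k h hk2
    · rw [if_neg hc] at hk2; simp at hk2; omega

theorem pvRunA_stop (nums : List Int) (v : Int) (fuel count j : Nat) :
    nums.length ≤ j + fuel → (pvRunA nums v fuel count j).2 < nums.length →
    nums.getD (pvRunA nums v fuel count j).2 0 ≠ v := by
  induction fuel generalizing count j with
  | zero =>
    intro hf h
    simp [pvRunA] at h
    omega
  | succ m ih =>
    intro hf h
    rw [pvRunA] at h ⊢
    by_cases hc : j < nums.length ∧ nums.getD j 0 = v
    · rw [if_pos hc] at h ⊢
      exact ih (count + 1) (j + 1) (by omega) h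
    · rw [if_neg hc] at h ⊢
      intro hv
      simp only at h hv
      exact hc ⟨h, hv⟩

theorem pvRunA_fst (nums : List Int) (v : Int) (fuel count j : Nat) :
    (pvRunA nums v fuel count j).1 = count + ((pvRunA nums v fuel count j).2 - j) := by
  induction fuel generalizing count j with
  | zero => simp [pvRunA]
  | succ m ih =>
    rw [pvRunA]
    split
    · have h1 := ih (count + 1) (j + 1)
      have h2 := pvRunA_snd_ge nums v m (count + 1) (j + 1)
      omega
    · simp

theorem drop_cons_getD (nums : List Int) (i : Nat) (h : i < nums.length) :
    nums.drop i = nums.getD i 0 :: nums.drop (i + 1) := by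
  rw [List.drop_eq_getElem_cons h, List.getD_eq_getElem nums 0 h]

-- one step of pvGo when prev equals the current element
theorem pvGo_step (nums : List Int) (v : Int) (i : Nat) (h : i < nums.length)
    (hv : nums.getD i 0 = v) :
    pvGo (nums.drop i) (some v) = pvGo (nums.drop (i + 1)) (some v) := by
  rw [drop_cons_getD nums i h, hv]
  by_cases h2 : i + 1 < nums.length
  · rw [drop_cons_getD nums (i + 1) h2]
    simp [pvGo]
  · have : nums.drop (i + 1) = [] := List.drop_eq_nil_of_le (by omega)
    rw [this]; simp [pvGo]

-- pvGo skips over the interior of a run of v's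
theorem pvGo_run2 (nums : List Int) (v : Int) :
    ∀ n i j, j - i = n → i ≤ j → j ≤ nums.length →
    (∀ k, i ≤ k → k < j → nums.getD k 0 = v) →
    pvGo (nums.drop i) (some v) = pvGo (nums.drop j) (some v) := by
  intro n
  induction n with
  | zero =>
    intro i j h1 h2 _ _
    have hij : i = j := by omega
    rw [hij]
  | succ m ih =>
    intro i j h1 h2 h3 hall
    have hi : i < nums.length := by omega
    rw [pvGo_step nums v i hi (hall i le_rfl (by omega))]
    exact ih (i + 1) j (by omega) (by omega) h3 (fun k hk1 hk2 => hall k (by omega) hk2)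

-- pvGo over one whole run starting at i and ending at j
theorem pvGo_run (nums : List Int) (v : Int) (i j : Nat) (prev : Option Int)
    (h1 : i < j) (h2 : j ≤ nums.length)
    (hall : ∀ k, i ≤ k → k < j → nums.getD k 0 = v)
    (hstop : j < nums.length → nums.getD j 0 ≠ v)
    (hprev : prev ≠ some v) :
    pvGo (nums.drop i) prev =
      (if i + 1 < j then [v] else []) ++ pvGo (nums.drop j) (some v) := by
  have hi : i < nums.length := by omega
  have hv : nums.getD i 0 = v := hall i le_rfl h1
  by_cases hlong : i + 1 < j
  · -- run of length ≥ 2: the first pair fires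
    have h2' : i + 1 < nums.length := by omega
    have hv1 : nums.getD (i + 1) 0 = v := hall (i + 1) (by omega) hlong
    have e1 : nums.drop i = v :: v :: nums.drop (i + 2) := by
      rw [drop_cons_getD nums i hi, hv, drop_cons_getD nums (i + 1) h2', hv1]
    have e3 : v :: nums.drop (i + 2) = nums.drop (i + 1) := by
      rw [drop_cons_getD nums (i + 1) h2', hv1]
    rw [e1]
    simp only [pvGo, true_and]
    rw [if_pos hprev, e3]
    rw [pvGo_run2 nums v (j - (i + 1)) (i + 1) j rfl (by omega) h2
        (fun k hk1 hk2 => hall k (by omega) hk2)]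
    rw [if_pos hlong]
  · -- run of length 1: j = i + 1, nothing appended
    have hj : j = i + 1 := by omega
    subst hj
    rw [drop_cons_getD nums i hi, hv]
    by_cases h3 : i + 1 < nums.length
    · rw [drop_cons_getD nums (i + 1) h3]
      have hne : nums.getD (i + 1) 0 ≠ v := hstop h3
      simp only [pvGo]
      rw [if_neg (by intro hc; exact hne hc.1.symm)]
      simp
    · have : nums.drop (i + 1) = [] := List.drop_eq_nil_of_le (by omega)
      rw [this]; simp [pvGo]

theorem pvLoopA_go (nums : List Int) :
    ∀ fuel i acc (prev : Option Int), nums.length ≤ i + fuel →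
    (i < nums.length → prev ≠ some (nums.getD i 0)) →
    pvLoopA nums fuel i acc = acc ++ pvGo (nums.drop i) prev := by
  intro fuel
  induction fuel with
  | zero =>
    intro i acc prev hf _
    rw [pvLoopA, List.drop_eq_nil_of_le (by omega)]
    simp [pvGo]
  | succ m ih =>
    intro i acc prev hf hprev
    by_cases hi : i < nums.length
    · set v := nums.getD i 0 with hvdef
      set r := pvRunA nums v nums.length 1 (i + 1) with hr
      have hge : i + 1 ≤ r.2 := pvRunA_snd_ge nums v nums.length 1 (i + 1)
      have hle : r.2 ≤ nums.length := pvRunA_snd_le nums v nums.length 1 (i + 1) (by omega)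
      have hall : ∀ k, i ≤ k → k < r.2 → nums.getD k 0 = v := by
        intro k hk1 hk2
        rcases Nat.eq_or_lt_of_le hk1 with rfl | h
        · rfl
        · exact pvRunA_mem nums v nums.length 1 (i + 1) k h hk2
      have hstop : r.2 < nums.length → nums.getD r.2 0 ≠ v := by
        have h1 := pvRunA_stop nums v nums.length 1 (i + 1) (by omega)
        rw [← hr] at h1
        exact h1
      have hfst : r.1 > 1 ↔ i + 1 < r.2 := by
        have h1 := pvRunA_fst nums v nums.length 1 (i + 1)
        rw [← hr] at h1
        omega
      have hstep : pvLoopA nums (m + 1) i acc =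
          pvLoopA nums m r.2 (if r.1 > 1 then acc ++ [v] else acc) := by
        rw [pvLoopA]; simp only [if_pos hi]; rfl
      rw [hstep]
      rw [ih r.2 _ (some v) (by omega)
            (fun h => by simpa using (hstop h).symm)]
      rw [pvGo_run nums v i r.2 prev (by omega) hle hall hstop
            (fun hc => hprev hi (by rw [hc]))]
      by_cases hc : i + 1 < r.2
      · rw [if_pos (hfst.mpr hc), if_pos hc]; simp
      · rw [if_neg (by omega : ¬ r.1 > 1), if_neg hc]; simp
    · rw [pvLoopA]
      simp only [if_neg hi]
      rw [List.drop_eq_nil_of_le (by omega)]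
      simp [pvGo]

-- ===== VERDICT (by name: the statement is the Claim_ definition above) =====
theorem find_duplicates_in_sorted_array_spec : Claim_equal_find_duplicates_in_sorted_array := by
  intro nums _
  show find_duplicates_in_sorted_array nums = find_duplicates_in_sorted_array_alt nums
  rw [find_duplicates_in_sorted_array_alt, pvFold_go]
  rw [find_duplicates_in_sorted_array]
  by_cases h : nums = []
  · subst h; simp [pvGo]
  · rw [if_neg h]
    have := pvLoopA_go nums nums.length 0 [] none (by omega) (by simp)
    simpa using this
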